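-- pv_equiv track=rewrite | github.com/Paurian/advent-of-code | 2025/Day 08/day_08_puzzle.py | calculate_top_three_circuits
-- ===== SOURCE A (Python) =====
-- def calculate_top_three_circuits(chained_box_sets):
--     """
--     Calculates the top three circuits based on the number of junction boxes.
--
--     :param chained_box_sets: List of sets representing joined junction boxes.
--     :return: Product of the sizes of the top three largest circuits.
--     """
--     sorted_box_sets = sorted(chained_box_sets, key=lambda s: len(s), reverse=True)
--     r = min(3, len(sorted_box_sets))
--     top_three_sizes = [len(sorted_box_sets[i]) for i in range(r)]
--     product = 1
--     for size in top_three_sizes: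
--         product *= size
--     return product
-- ===== SOURCE B (Python) =====
-- def calculate_top_three_circuits(chained_box_sets):
--     """
--     Calculates the top three circuits based on the number of junction boxes.
--
--     :param chained_box_sets: List of sets representing joined junction boxes.
--     :return: Product of the sizes of the top three largest circuits.
--     """
--     # One pass: keep the three largest sizes seen so far (-1 = empty slot).
--     t1 = t2 = t3 = -1
--     for s in chained_box_sets:
--         n = len(s)
--         if n > t1:
--             t1, t2, t3 = n, t1, t2
--         elif n > t2:
--             t2, t3 = n, t2
--         elif n > t3:
--             t3 = n
--     product = 1
--     for t in (t1, t2, t3):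
--         if t >= 0:
--             product *= t
--     return product
-- ===== Notes on version B (the rewrite author's own statement) =====
-- stated objective: alternative
-- what changed: Replaced sort-then-take-three with a single pass that maintains the three largest set sizes in three variables and multiplies the retained sizes; trades the O(n log n) sort for an O(n) scan, though the measured wall-clock is the same.
import Mathlib
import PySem

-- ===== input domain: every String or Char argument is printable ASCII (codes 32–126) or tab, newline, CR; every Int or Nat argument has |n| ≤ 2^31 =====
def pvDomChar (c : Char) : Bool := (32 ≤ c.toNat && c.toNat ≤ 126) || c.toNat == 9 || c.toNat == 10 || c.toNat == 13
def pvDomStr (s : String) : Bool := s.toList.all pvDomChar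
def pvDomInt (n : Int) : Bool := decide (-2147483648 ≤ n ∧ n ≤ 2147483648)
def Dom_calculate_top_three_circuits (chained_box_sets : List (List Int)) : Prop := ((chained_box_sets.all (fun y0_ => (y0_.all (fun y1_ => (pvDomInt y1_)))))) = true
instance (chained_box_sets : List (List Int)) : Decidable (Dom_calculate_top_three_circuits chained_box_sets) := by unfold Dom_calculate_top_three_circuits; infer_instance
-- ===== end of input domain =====

-- B replaces sort-then-take-three by a single pass keeping the three largest sizes (alternative algorithm, same measured cost).

-- ===== PORT A =====
def calculate_top_three_circuits (chained_box_sets : List (List Int)) : Int :=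
  let sorted_box_sets := PySem.List.sorted chained_box_sets (fun s => PySem.List.len s) true
  let r : Int := min 3 (PySem.List.len sorted_box_sets)
  let top_three_sizes := (PySem.List.pyRange 0 r 1).map
    (fun i => PySem.List.len (PySem.List.pyGetD sorted_box_sets i []))
  top_three_sizes.foldl (fun product size => product * size) 1

-- ===== PORT B =====
-- one step of B's loop: fold the size n into the three largest-so-far (-1 = empty slot)
def pvUpd (t : Int × Int × Int) (n : Int) : Int × Int × Int :=
  if n > t.1 then (n, t.1, t.2.1)
  else if n > t.2.1 then (t.1, n, t.2.1)
  else if n > t.2.2 then (t.1, t.2.1, n)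
  else t

def calculate_top_three_circuits_alt (chained_box_sets : List (List Int)) : Int :=
  let t := chained_box_sets.foldl (fun t s => pvUpd t (PySem.List.len s))
    ((-1 : Int), (-1 : Int), (-1 : Int))
  [t.1, t.2.1, t.2.2].foldl (fun product x => if x ≥ 0 then product * x else product) 1

-- ===== PRECONDITION & SPEC =====
def Spec_calculate_top_three_circuits (chained_box_sets : List (List Int)) (out : Int) : Prop := out = calculate_top_three_circuits_alt chained_box_sets
instance (chained_box_sets : List (List Int)) (out : Int) : Decidable (Spec_calculate_top_three_circuits chained_box_sets out) := by unfold Spec_calculate_top_three_circuits; infer_instance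

-- ===== CLAIM (what is proved, stated in full; the proofs are below) =====
def Claim_equal_calculate_top_three_circuits : Prop := ∀ (chained_box_sets : List (List Int)), Dom_calculate_top_three_circuits chained_box_sets → Spec_calculate_top_three_circuits chained_box_sets (calculate_top_three_circuits chained_box_sets)

-- ===== LEMMAS AND PROOFS =====

-- descending insertion (proof-only reference implementation of "sorted by size, descending")
def pvInsD (n : Int) : List Int → List Int
  | [] => [n]
  | x :: xs => if n > x then n :: x :: xs else x :: pvInsD n xs

def pvSortD (ls : List Int) : List Int := ls.foldl (fun acc n => pvInsD n acc) []

-- the first three entries of a list, padded with the sentinel -1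
def pvPad (l : List Int) : Int × Int × Int := (l.getD 0 (-1), l.getD 1 (-1), l.getD 2 (-1))

theorem pvInsD_perm (n : Int) (l : List Int) : (pvInsD n l).Perm (n :: l) := by
  induction l with
  | nil => simp [pvInsD]
  | cons x xs ih =>
    simp only [pvInsD]
    split
    · exact List.Perm.refl _
    · exact (ih.cons x).trans (List.Perm.swap n x xs)

theorem pvInsD_pairwise (n : Int) (l : List Int)
    (h : l.Pairwise (fun a b => b ≤ a)) : (pvInsD n l).Pairwise (fun a b => b ≤ a) := by
  induction l with
  | nil => simp [pvInsD]
  | cons x xs ih =>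
    rcases List.pairwise_cons.mp h with ⟨hx, hxs⟩
    simp only [pvInsD]
    split
    · rename_i hn
      refine List.pairwise_cons.mpr ⟨?_, h⟩
      intro y hy
      rcases List.mem_cons.mp hy with hy | hy
      · omega
      · exact le_trans (hx y hy) (by omega)
    · rename_i hn
      refine List.pairwise_cons.mpr ⟨?_, ih hxs⟩
      intro y hy
      rcases List.mem_cons.mp ((pvInsD_perm n xs).mem_iff.mp hy) with hy | hy
      · omega
      · exact hx y hy

theorem pvSortD_aux (ls acc : List Int) (hacc : acc.Pairwise (fun a b => b ≤ a)) :
    (ls.foldl (fun acc n => pvInsD n acc) acc).Pairwise (fun a b => b ≤ a) ∧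
    (ls.foldl (fun acc n => pvInsD n acc) acc).Perm (ls ++ acc) := by
  induction ls generalizing acc with
  | nil => exact ⟨hacc, by simp⟩
  | cons n rest ih =>
    obtain ⟨h1, h2⟩ := ih (pvInsD n acc) (pvInsD_pairwise n acc hacc)
    refine ⟨h1, ?_⟩
    simp only [List.foldl_cons]
    exact h2.trans ((List.Perm.append_left rest (pvInsD_perm n acc)).trans List.perm_middle)

theorem pvSortD_pairwise (ls : List Int) : (pvSortD ls).Pairwise (fun a b => b ≤ a) :=
  (pvSortD_aux ls [] (by simp)).1

theorem pvSortD_perm (ls : List Int) : (pvSortD ls).Perm ls := by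
  simpa using (pvSortD_aux ls [] (by simp)).2

-- any two ≥-sorted arrangements of the same multiset coincide
theorem pvDescUnique {l₁ l₂ : List Int} (hp : l₁.Perm l₂)
    (h1 : l₁.Pairwise (fun a b => b ≤ a)) (h2 : l₂.Pairwise (fun a b => b ≤ a)) : l₁ = l₂ :=
  hp.eq_of_pairwise (fun _ _ _ _ hab hba => le_antisymm hba hab) h1 h2

-- the sizes of A's descending sort ARE the descending sort of the sizes
theorem pvSortedMap (xs : List (List Int)) :
    (PySem.List.sorted xs (fun s => PySem.List.len s) true).map (fun s => PySem.List.len s)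
      = pvSortD (xs.map (fun s => PySem.List.len s)) := by
  apply pvDescUnique
  · exact ((PySem.List.sorted_perm xs _ true).map _).trans (pvSortD_perm _).symm
  · exact (List.pairwise_map).mpr (PySem.List.sorted_pairwise_rev xs _)
  · exact pvSortD_pairwise _

-- one step of B's loop tracks the padded head of the descending insertion
theorem pvUpd_pad (acc : List Int) (n : Int) (hn : 0 ≤ n) :
    pvUpd (pvPad acc) n = pvPad (pvInsD n acc) := by
  match acc with
  | [] => simp [pvUpd, pvPad, pvInsD]; omega
  | [a] =>
    simp only [pvUpd, pvPad, pvInsD]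
    split_ifs with h1 h2 <;> simp_all <;> omega
  | [a, b] =>
    simp only [pvUpd, pvPad, pvInsD]
    split_ifs with h1 h2 h3 <;> simp_all <;> omega
  | a :: b :: c :: rest =>
    simp only [pvUpd, pvPad, pvInsD]
    split_ifs with h1 h2 h3 <;> simp_all

-- B's whole loop equals pad of the descending insertion sort
theorem pvFold_pad (ls acc : List Int) (hls : ∀ x ∈ ls, 0 ≤ x) :
    ls.foldl pvUpd (pvPad acc) = pvPad (ls.foldl (fun acc n => pvInsD n acc) acc) := by
  induction ls generalizing acc with
  | nil => rfl
  | cons n rest ih =>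
    simp only [List.foldl_cons]
    rw [pvUpd_pad acc n (hls n (by simp)), ih (pvInsD n acc) (fun x hx => hls x (by simp [hx]))]

-- both final computations agree on any list of nonnegative sizes
theorem pvFinal (L : List Int) (hL : ∀ x ∈ L, 0 ≤ x) :
    ((PySem.List.pyRange 0 (min 3 ((L.length : Int))) 1).map
        (fun i => PySem.List.pyGetD L i 0)).foldl (fun p s => p * s) 1
    = [(pvPad L).1, (pvPad L).2.1, (pvPad L).2.2].foldl
        (fun p x => if x ≥ 0 then p * x else p) 1 := by
  match L with
  | [] => decide
  | [a] =>
    have ha := hL a (by simp)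
    have h1 : min (3 : Int) ((([a] : List Int).length : Int)) = 1 := by simp
    rw [h1]
    have h2 : PySem.List.pyRange 0 1 1 = [0] := by decide
    rw [h2]
    simp [PySem.List.pyGetD_of_nonneg, pvPad]
    omega
  | [a, b] =>
    have ha := hL a (by simp); have hb := hL b (by simp)
    have h1 : min (3 : Int) ((([a, b] : List Int).length : Int)) = 2 := by simp
    rw [h1]
    have h2 : PySem.List.pyRange 0 2 1 = [0, 1] := by decide
    rw [h2]
    simp [PySem.List.pyGetD_of_nonneg, pvPad]
    omega
  | a :: b :: c :: rest =>
    have ha := hL a (by simp); have hb := hL b (by simp); have hc := hL c (by simp)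
    have h1 : min (3 : Int) (((a :: b :: c :: rest).length : Int)) = 3 := by
      simp; omega
    rw [h1]
    have h2 : PySem.List.pyRange 0 3 1 = [0, 1, 2] := by decide
    rw [h2]
    simp only [List.map_cons, List.map_nil, List.foldl_cons, List.foldl_nil,
      PySem.List.pyGetD_of_nonneg _ _ (by omega : (0:Int) ≤ 0),
      PySem.List.pyGetD_of_nonneg _ _ (by omega : (0:Int) ≤ 1),
      PySem.List.pyGetD_of_nonneg _ _ (by omega : (0:Int) ≤ 2), pvPad]
    simp
    omega

-- ===== VERDICT (by name: the statement is the Claim_ definition above) =====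
theorem calculate_top_three_circuits_spec : Claim_equal_calculate_top_three_circuits := by
  intro xs _
  unfold Spec_calculate_top_three_circuits
  have hnn : ∀ x ∈ xs.map (fun s => PySem.List.len s), 0 ≤ x := by
    intro x hx
    rcases List.mem_map.mp hx with ⟨s, _, rfl⟩
    simp [PySem.List.len_eq]
  -- B's loop over the sets is the loop over the sizes
  have hB : xs.foldl (fun t s => pvUpd t (PySem.List.len s)) ((-1 : Int), (-1 : Int), (-1 : Int))
      = pvPad (pvSortD (xs.map (fun s => PySem.List.len s))) := by
    calc xs.foldl (fun t s => pvUpd t (PySem.List.len s)) ((-1 : Int), (-1 : Int), (-1 : Int))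
        = (xs.map (fun s => PySem.List.len s)).foldl pvUpd (pvPad []) := by
          rw [List.foldl_map]; rfl
      _ = pvPad ((xs.map (fun s => PySem.List.len s)).foldl (fun acc n => pvInsD n acc) []) :=
          pvFold_pad _ [] hnn
      _ = pvPad (pvSortD (xs.map (fun s => PySem.List.len s))) := rfl
  -- A's indexed sizes are indexed into the descending sort of the sizes
  have hA : (fun i => PySem.List.len
        (PySem.List.pyGetD (PySem.List.sorted xs (fun s => PySem.List.len s) true) i []))
      = fun i => PySem.List.pyGetD (pvSortD (xs.map (fun s => PySem.List.len s))) i 0 := by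
    funext i
    have h := PySem.List.pyGetD_map (fun s => PySem.List.len s)
      (PySem.List.sorted xs (fun s => PySem.List.len s) true) i []
    rw [pvSortedMap] at h
    simpa [PySem.List.len_eq] using h.symm
  have hlen : PySem.List.len (PySem.List.sorted xs (fun s => PySem.List.len s) true)
      = (((pvSortD (xs.map (fun s => PySem.List.len s))).length : Int)) := by
    rw [PySem.List.len_eq, PySem.List.length_sorted,
      (pvSortD_perm (xs.map (fun s => PySem.List.len s))).length_eq, List.length_map]
  simp only [calculate_top_three_circuits, calculate_top_three_circuits_alt, hB, hlen, hA]
  exact pvFinal (pvSortD (xs.map (fun s => PySem.List.len s)))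
    (fun x hx => hnn x ((pvSortD_perm _).mem_iff.mp hx))
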